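-- pv_equiv track=rewrite | github.com/reachjvc/Daygame_coach | old_scripts/extract_interactions.py | group_by_conversation_id
-- ===== SOURCE A (Python) =====
-- from typing import Dict, List, Optional, Tuple
--
-- def group_by_conversation_id(segments: List[Dict]) -> Dict[int, List[Dict]]:
--     """Group segments by conversation_id (from detect_conversations.py)."""
--     groups: Dict[int, List[Dict]] = {}
--     for seg in segments:
--         conv_id = seg.get("conversation_id", 0)
--         # Only include approach segments (conv_id > 0)
--         if conv_id > 0:
--             if conv_id not in groups:
--                 groups[conv_id] = []
--             groups[conv_id].append(seg)
--     return groups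
-- ===== SOURCE B (Python) =====
-- def group_by_conversation_id(segments):
--     """Group segments by conversation_id: collect the distinct positive ids in
--     first-appearance order, then build each group with a per-id filter pass."""
--     keys = []
--     for seg in segments:
--         cid = seg.get("conversation_id", 0)
--         if cid > 0 and cid not in keys:
--             keys.append(cid)
--     return {k: [s for s in segments if s.get("conversation_id", 0) == k]
--             for k in keys}
-- ===== Notes on version B (the rewrite author's own statement) =====
-- stated objective: alternative
-- what changed: Replaces the single-pass dict building with conditional insert/append by a two-phase decomposition: one pass collects the distinct positive ids in first-appearance order, then a dict comprehension builds each group by filtering the input per id.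
import Mathlib
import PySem

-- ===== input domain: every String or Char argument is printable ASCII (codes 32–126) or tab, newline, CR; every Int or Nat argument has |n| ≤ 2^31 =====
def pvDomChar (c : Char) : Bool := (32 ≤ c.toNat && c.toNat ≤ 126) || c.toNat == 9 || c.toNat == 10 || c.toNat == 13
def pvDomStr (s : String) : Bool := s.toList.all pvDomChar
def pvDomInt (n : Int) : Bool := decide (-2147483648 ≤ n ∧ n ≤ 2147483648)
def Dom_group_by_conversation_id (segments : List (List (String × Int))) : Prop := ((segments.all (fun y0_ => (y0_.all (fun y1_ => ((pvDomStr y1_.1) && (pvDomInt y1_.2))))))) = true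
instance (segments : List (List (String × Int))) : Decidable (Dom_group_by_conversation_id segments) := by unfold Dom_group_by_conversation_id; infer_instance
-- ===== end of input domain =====

-- B replaces A's single-pass dict building (conditional insert + append) by a two-phase
-- decomposition: collect the distinct positive ids in first-appearance order, then build
-- each group as a per-id filter over the input; objective: alternative (same return value).

-- shared helper: seg.get("conversation_id", 0)
def pvKey (seg : List (String × Int)) : Int :=
  (PySem.Dict.mk seg).getD "conversation_id" 0

-- ===== PORT A =====
def group_by_conversation_id (segments : List (List (String × Int))) : List (Int × List (List (String × Int))) :=
  (segments.foldl (fun (groups : PySem.Dict Int (List (List (String × Int)))) seg =>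
      let conv_id := pvKey seg
      if conv_id > 0 then
        let groups1 := if groups.contains conv_id = false then groups.insert conv_id [] else groups
        -- groups[conv_id].append(seg): the key is present here, so this is exact
        groups1.modify conv_id [] (fun l => l ++ [seg])
      else groups)
    PySem.Dict.empty).items

-- ===== PORT B =====
def group_by_conversation_id_alt (segments : List (List (String × Int))) : List (Int × List (List (String × Int))) :=
  let keys := segments.foldl (fun (ks : List Int) seg =>
      let cid := pvKey seg
      if cid > 0 ∧ ks.contains cid = false then ks ++ [cid] else ks) []
  -- dict comprehension over distinct keys: items in key order
  keys.map (fun k => (k, segments.filter (fun s => pvKey s == k)))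

-- ===== PRECONDITION & SPEC =====
def Spec_group_by_conversation_id (segments : List (List (String × Int))) (out : List (Int × List (List (String × Int)))) : Prop := out = group_by_conversation_id_alt segments
instance (segments : List (List (String × Int))) (out : List (Int × List (List (String × Int)))) : Decidable (Spec_group_by_conversation_id segments out) := by unfold Spec_group_by_conversation_id; infer_instance

-- ===== CLAIM (what is proved, stated in full; the proofs are below) =====
def Claim_equal_group_by_conversation_id : Prop := ∀ (segments : List (List (String × Int))), Dom_group_by_conversation_id segments → Spec_group_by_conversation_id segments (group_by_conversation_id segments)

-- ===== LEMMAS AND PROOFS =====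

-- B's key-collecting loop is Set.update over the positive keys
theorem keysB_eq (segments : List (List (String × Int))) (acc : List Int) :
    segments.foldl (fun (ks : List Int) seg =>
        let cid := pvKey seg
        if cid > 0 ∧ ks.contains cid = false then ks ++ [cid] else ks) acc
      = PySem.Set.update acc ((segments.filter (fun s => decide (0 < pvKey s))).map pvKey) := by
  induction segments generalizing acc with
  | nil => simp [PySem.Set.update]
  | cons s rest ih =>
      by_cases hp : 0 < pvKey s
      · rw [List.foldl_cons, List.filter_cons_of_pos (by simpa using hp), List.map_cons,
          PySem.Set.update_cons]
        by_cases hc : acc.contains (pvKey s) = false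
        · have hnm : pvKey s ∉ acc := by simpa using hc
          rw [if_pos ⟨hp, hc⟩, PySem.Set.add_of_not_mem hnm, ih]
        · have hct : acc.contains (pvKey s) = true := by
            revert hc; cases acc.contains (pvKey s) <;> simp
          have hm : pvKey s ∈ acc := List.mem_of_elem_eq_true hct
          rw [if_neg (fun h => hc h.2), PySem.Set.add_of_mem hm, ih]
      · rw [List.foldl_cons, List.filter_cons_of_neg (by simpa using hp),
          if_neg (fun h => hp h.1), ih]

-- A's loop step simplifies to a single modify when the key is positive
theorem astep_eq (g : PySem.Dict Int (List (List (String × Int)))) (seg : List (String × Int))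
    (hp : pvKey seg > 0) :
    (if pvKey seg > 0 then
        let groups1 := if g.contains (pvKey seg) = false then g.insert (pvKey seg) [] else g
        groups1.modify (pvKey seg) [] (fun l => l ++ [seg])
      else g)
      = g.modify (pvKey seg) [] (fun l => l ++ [seg]) := by
  rw [if_pos hp]
  by_cases hc : g.contains (pvKey seg) = false
  · rw [if_pos hc]
    simp [PySem.Dict.modify, PySem.Dict.getD_insert_self, PySem.Dict.insert_insert_self,
      PySem.Dict.getD_of_not_contains, hc]
  · simp [hc]

theorem group_by_conversation_id_spec' (segments : List (List (String × Int))) :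
    group_by_conversation_id segments = group_by_conversation_id_alt segments := by
  unfold group_by_conversation_id group_by_conversation_id_alt
  -- rewrite A's fold: drop non-positive segments, then express as a modify-fold over key/segment pairs
  have h1 : (segments.foldl (fun (groups : PySem.Dict Int (List (List (String × Int)))) seg =>
      let conv_id := pvKey seg
      if conv_id > 0 then
        let groups1 := if groups.contains conv_id = false then groups.insert conv_id [] else groups
        groups1.modify conv_id [] (fun l => l ++ [seg])
      else groups) PySem.Dict.empty)
      = ((segments.filter (fun s => decide (0 < pvKey s))).map (fun s => (pvKey s, s))).foldl
          (fun d p => d.modify p.1 [] (fun l => l ++ [p.2])) PySem.Dict.empty := by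
    rw [List.foldl_map, List.foldl_filter]
    apply PySem.List.foldl_congr_mem
    intro d s _
    by_cases hp : 0 < pvKey s
    · simpa [hp] using astep_eq d s hp
    · simp [hp]
  rw [h1]
  set L := (segments.filter (fun s => decide (0 < pvKey s))).map (fun s => (pvKey s, s)) with hL
  set D := L.foldl (fun d p => d.modify p.1 [] (fun l => l ++ [p.2])) PySem.Dict.empty with hD
  have hkeys : D.keys = PySem.Set.ofList ((segments.filter (fun s => decide (0 < pvKey s))).map pvKey) := by
    rw [hD, hL, List.foldl_map,
      PySem.Dict.keys_foldl_modify_key _ pvKey [] (fun _ s => fun l => l ++ [s]) PySem.Dict.empty]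
    simp [PySem.Set.update_nil_left]
  have hnodup : D.keys.Nodup := by rw [hkeys]; exact PySem.Set.nodup_ofList _
  have hkeysB : (segments.foldl (fun (ks : List Int) seg =>
      let cid := pvKey seg
      if cid > 0 ∧ ks.contains cid = false then ks ++ [cid] else ks) [])
      = D.keys := by
    rw [keysB_eq, PySem.Set.update_nil_left, hkeys]
  rw [PySem.Dict.items_eq_map_keys D hnodup [], ← hkeysB]
  apply List.map_congr_left
  intro k hk
  have hkpos : 0 < k := by
    rw [hkeysB, hkeys] at hk
    rcases List.mem_map.mp ((PySem.Set.mem_ofList _ _).mp hk) with ⟨s, hs, rfl⟩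
    simpa using (List.mem_filter.mp hs).2
  have hget : D.getD k [] = segments.filter (fun s => pvKey s == k) := by
    rw [hD, hL, PySem.Dict.getD_foldl_modify_append]
    simp only [PySem.Dict.getD_empty, List.nil_append, List.filter_map, List.map_map,
      List.filter_filter, Function.comp_def, List.map_id']
    exact List.filter_congr (fun s _ => by by_cases he : pvKey s = k <;> simp [he, hkpos])
  rw [hget]

theorem group_by_conversation_id_spec : Claim_equal_group_by_conversation_id := by
  intro segments _
  unfold Spec_group_by_conversation_id
  exact group_by_conversation_id_spec' segments
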